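-- pv_equiv track=rewrite | github.com/cmplx-xyttmt/competitive-programming | python/src/advent_of_code/2023/day6/day6.py | ways_to_beat_record_binary_search
-- ===== SOURCE A (Python) =====
-- def get_ways(time, charge_time):
--     start = charge_time
--     end = time - start
--     return end - start + 1
--
-- def get_distance(time, charge_time):
--     return charge_time * (time - charge_time)
--
-- def ways_to_beat_record_binary_search(time, record_distance):
--     # Invariant:
--     # left -> doesn't beat the record
--     # right -> beats the record
--     left_charge_time = 0
--     assert get_distance(time, left_charge_time) < record_distance  # ensure that the left invariant is held at the start
--     right_charge_time = time // 2
--     assert get_distance(time, right_charge_time) > record_distance # ensure that the right invariant is held at the start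
--
--     while right_charge_time > left_charge_time + 1:
--         mid = (left_charge_time + right_charge_time) // 2
--         beats_record = get_distance(time, mid) > record_distance
--         if beats_record:
--             right_charge_time = mid
--         else:
--             left_charge_time = mid
--
--     return get_ways(time, right_charge_time)
-- ===== SOURCE B (Python) =====
-- def _isqrt(n):
--     # Newton's method for the integer square root (n >= 1)
--     x = n
--     y = (x + 1) // 2
--     while y < x:
--         x = y
--         y = (x + n // x) // 2
--     return x
--
-- def ways_to_beat_record_binary_search(time, record_distance):
--     # same preconditions as the binary-search version (AssertionError behaviour preserved)
--     assert 0 * (time - 0) < record_distance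
--     assert (time // 2) * (time - time // 2) > record_distance
--     # charge times beating the record are the integers strictly between the two
--     # roots of c*(time-c) = record_distance; find the largest one from the
--     # discriminant, the smallest is its mirror image about time/2
--     disc = time * time - 4 * record_distance
--     s = _isqrt(disc)
--     hi = (time + s) // 2
--     if hi * (time - hi) <= record_distance:
--         hi -= 1
--     lo = time - hi
--     # valid charge times are 0..time
--     lo = max(lo, 0)
--     hi = min(hi, time)
--     return max(hi - lo + 1, 0)
-- ===== Notes on version B (the rewrite author's own statement) =====
-- stated objective: alternative
-- what changed: Replaced the boundary binary search plus symmetric get_ways formula by the closed form: the beating charge times are the integers strictly between the roots of c*(time-c) = record_distance, found from the discriminant with a hand-written Newton integer square root, then clamped to the valid charge times 0..time; A's two assertions are kept verbatim so the AssertionError behaviour matches.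
-- intended difference: For negative time (where both assertions can still pass, e.g. (-5, 5)), A's symmetric formula returns 1 or 2 although there is no valid charge time at all; B returns 0, the intended count of the empty 0..time range. — e.g. on ways_to_beat_record_binary_search(-5, 5): A returns 2, B returns 0
import Mathlib
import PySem

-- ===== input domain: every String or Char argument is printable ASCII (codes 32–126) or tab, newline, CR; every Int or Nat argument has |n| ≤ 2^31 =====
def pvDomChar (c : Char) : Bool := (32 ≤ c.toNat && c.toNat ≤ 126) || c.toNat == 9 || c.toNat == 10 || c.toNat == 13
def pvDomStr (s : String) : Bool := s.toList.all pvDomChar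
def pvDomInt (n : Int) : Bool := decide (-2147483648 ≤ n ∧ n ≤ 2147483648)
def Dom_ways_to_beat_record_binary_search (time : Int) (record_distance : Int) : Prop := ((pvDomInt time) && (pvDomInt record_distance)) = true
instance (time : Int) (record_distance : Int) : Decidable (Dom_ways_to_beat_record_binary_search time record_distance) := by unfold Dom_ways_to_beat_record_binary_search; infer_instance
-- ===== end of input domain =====

-- B replaces A's boundary binary search by the closed form: the beating charge times are the integers strictly between
-- the roots of c*(time-c) = record_distance, found from the discriminant with a Newton integer sqrt; A's two asserts are
-- kept (captured by Pre_). On negative time (inside Pre_) A's formula and B's clamped count differ — stated as D_ below.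

-- ===== PORT A =====
def pvGetWays (time charge_time : Int) : Int := (time - charge_time) - charge_time + 1
def pvGetDistance (time charge_time : Int) : Int := charge_time * (time - charge_time)

-- termination facts for the binary-search loop (cited by decreasing_by)
theorem pvMid_lt (l r : Int) (h : l + 1 < r) : PySem.Int.floordiv (l + r) 2 < r := by
  rw [PySem.Int.floordiv_eq_ediv_of_pos (by norm_num)]; omega

theorem pvLt_mid (l r : Int) (h : l + 1 < r) : l < PySem.Int.floordiv (l + r) 2 := by
  rw [PySem.Int.floordiv_eq_ediv_of_pos (by norm_num)]; omega

-- the while loop of A (asserts are excluded by Pre_ below)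
def pvLoopA (time record_distance left_charge_time right_charge_time : Int) : Int :=
  if _h : right_charge_time > left_charge_time + 1 then
    let mid := PySem.Int.floordiv (left_charge_time + right_charge_time) 2
    if pvGetDistance time mid > record_distance then
      pvLoopA time record_distance left_charge_time mid
    else
      pvLoopA time record_distance mid right_charge_time
  else right_charge_time
termination_by (right_charge_time - left_charge_time).toNat
decreasing_by
  · have := pvMid_lt left_charge_time right_charge_time (by omega)
    have := pvLt_mid left_charge_time right_charge_time (by omega)
    omega
  · have := pvMid_lt left_charge_time right_charge_time (by omega)
    have := pvLt_mid left_charge_time right_charge_time (by omega)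
    omega

def ways_to_beat_record_binary_search (time : Int) (record_distance : Int) : Int :=
  let left_charge_time : Int := 0
  let right_charge_time : Int := PySem.Int.floordiv time 2
  pvGetWays time (pvLoopA time record_distance left_charge_time right_charge_time)

-- ===== PORT B =====
-- Source B's hand-written Newton loop for the integer square root; the fuel only makes the Python 'while' total
-- (inside Pre_ the argument is ≥ 1 and the loop terminates well within it)
def pvIsqrtGo (n : Int) (fuel : Nat) (x y : Int) : Int :=
  match fuel with
  | 0 => x
  | fuel + 1 =>
    if y < x then
      pvIsqrtGo n fuel y (PySem.Int.floordiv (y + PySem.Int.floordiv n y) 2)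
    else x

def pvIsqrt (n : Int) : Int := pvIsqrtGo n (n.toNat + 1) n (PySem.Int.floordiv (n + 1) 2)

-- B's two asserts (identical to A's) are captured by Pre_ below
def ways_to_beat_record_binary_search_alt (time : Int) (record_distance : Int) : Int :=
  let disc := time * time - 4 * record_distance
  let s := pvIsqrt disc
  let hi := PySem.Int.floordiv (time + s) 2
  let hi := if hi * (time - hi) ≤ record_distance then hi - 1 else hi
  let lo := time - hi
  let lo := max lo 0
  let hi := min hi time
  max (hi - lo + 1) 0

-- ===== PRECONDITION & SPEC =====
-- Pre_ is exactly A's two asserts: get_distance(time,0) < record_distance and get_distance(time,time//2) > record_distance;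
-- outside it A raises AssertionError.
def Pre_ways_to_beat_record_binary_search (time : Int) (record_distance : Int) : Prop :=
  0 * (time - 0) < record_distance ∧
  record_distance < PySem.Int.floordiv time 2 * (time - PySem.Int.floordiv time 2)
instance (time : Int) (record_distance : Int) : Decidable (Pre_ways_to_beat_record_binary_search time record_distance) := by
  unfold Pre_ways_to_beat_record_binary_search; infer_instance

def pvWitness_ways_to_beat_record_binary_search : Int × Int := (7, 9)

-- For negative time (A's asserts can still pass there), A's symmetric formula returns 1 or 2 although no valid
-- charge time exists; B returns 0, the intended count of an empty range.
def D_ways_to_beat_record_binary_search (time : Int) (record_distance : Int) : Prop := time < 0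
instance (time : Int) (record_distance : Int) : Decidable (D_ways_to_beat_record_binary_search time record_distance) := by
  unfold D_ways_to_beat_record_binary_search; infer_instance

def Spec_ways_to_beat_record_binary_search (time : Int) (record_distance : Int) (out : Int) : Prop :=
  ¬ D_ways_to_beat_record_binary_search time record_distance → out = ways_to_beat_record_binary_search_alt time record_distance
instance (time : Int) (record_distance : Int) (out : Int) : Decidable (Spec_ways_to_beat_record_binary_search time record_distance out) := by
  unfold Spec_ways_to_beat_record_binary_search; infer_instance

def pvDiffWitness_ways_to_beat_record_binary_search : Int × Int := (-5, 5)
def pvDiffWitnessOut_ways_to_beat_record_binary_search : Int × Int := (2, 0)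

-- ===== CLAIM (what is proved, stated in full; the proofs are below) =====
def Claim_unchanged_ways_to_beat_record_binary_search : Prop := ∀ (time : Int) (record_distance : Int), Dom_ways_to_beat_record_binary_search time record_distance → Pre_ways_to_beat_record_binary_search time record_distance → Spec_ways_to_beat_record_binary_search time record_distance (ways_to_beat_record_binary_search time record_distance)
def Claim_changed_ways_to_beat_record_binary_search : Prop := Dom_ways_to_beat_record_binary_search (pvDiffWitness_ways_to_beat_record_binary_search.1) (pvDiffWitness_ways_to_beat_record_binary_search.2) ∧ Pre_ways_to_beat_record_binary_search (pvDiffWitness_ways_to_beat_record_binary_search.1) (pvDiffWitness_ways_to_beat_record_binary_search.2) ∧ D_ways_to_beat_record_binary_search (pvDiffWitness_ways_to_beat_record_binary_search.1) (pvDiffWitness_ways_to_beat_record_binary_search.2) ∧ ways_to_beat_record_binary_search (pvDiffWitness_ways_to_beat_record_binary_search.1) (pvDiffWitness_ways_to_beat_record_binary_search.2) = pvDiffWitnessOut_ways_to_beat_record_binary_search.1 ∧ ways_to_beat_record_binary_search_alt (pvDiffWitness_ways_to_beat_record_binary_search.1) (pvDiffWitness_ways_to_beat_record_binary_search.2) =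 pvDiffWitnessOut_ways_to_beat_record_binary_search.2 ∧ pvDiffWitnessOut_ways_to_beat_record_binary_search.1 ≠ pvDiffWitnessOut_ways_to_beat_record_binary_search.2
def Claim_exact_ways_to_beat_record_binary_search : Prop := ∀ (time : Int) (record_distance : Int), Dom_ways_to_beat_record_binary_search time record_distance → Pre_ways_to_beat_record_binary_search time record_distance → D_ways_to_beat_record_binary_search time record_distance → ways_to_beat_record_binary_search time record_distance ≠ ways_to_beat_record_binary_search_alt time record_distance

-- ===== LEMMAS AND PROOFS =====

-- invariant of A's binary search: it returns the first charge time that beats the record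
theorem pvLoopA_spec (time rec : Int) : ∀ (n : Nat) (left right : Int),
    (right - left).toNat ≤ n →
    left + 1 ≤ right →
    pvGetDistance time left ≤ rec → rec < pvGetDistance time right →
    rec < pvGetDistance time (pvLoopA time rec left right) ∧
    pvGetDistance time (pvLoopA time rec left right - 1) ≤ rec ∧
    left < pvLoopA time rec left right ∧ pvLoopA time rec left right ≤ right := by
  intro n
  induction n with
  | zero => intro left right hn hlr _ _; omega
  | succ n ih =>
    intro left right hn hlr hl hr
    rw [pvLoopA]
    by_cases hc : right > left + 1
    · have hm1 := pvLt_mid left right (by omega)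
      have hm2 := pvMid_lt left right (by omega)
      simp only [dif_pos hc]
      by_cases hb : pvGetDistance time (PySem.Int.floordiv (left + right) 2) > rec
      · simp only [if_pos hb]
        have := ih left (PySem.Int.floordiv (left + right) 2) (by omega) (by omega) hl hb
        exact ⟨this.1, this.2.1, this.2.2.1, by omega⟩
      · simp only [if_neg hb]
        have := ih (PySem.Int.floordiv (left + right) 2) right (by omega) (by omega) (by omega) hr
        exact ⟨this.1, this.2.1, by omega, this.2.2.2⟩
    · simp only [dif_neg hc]
      have hre : right = left + 1 := by omega
      refine ⟨hr, ?_, by omega, le_refl _⟩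
      rw [hre]; simpa using hl

-- with r the first beating charge time, beating is exactly lying in [r, time - r]
theorem pvBeats_iff (time rec r : Int) (h2r : 2 * r ≤ time)
    (hfr : rec < r * (time - r)) (hfl : (r - 1) * (time - (r - 1)) ≤ rec) :
    ∀ c : Int, 0 ≤ c → c ≤ time → (rec < c * (time - c) ↔ (r ≤ c ∧ c ≤ time - r)) := by
  intro c hc0 hct
  constructor
  · intro h
    by_contra hcon
    have : c < r ∨ time - r < c := by omega
    rcases this with hlt | hgt
    · have hprod : 0 ≤ (r - 1 - c) * ((time - (r - 1)) - c) :=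
        mul_nonneg (by omega) (by omega)
      nlinarith
    · have hprod : 0 ≤ (c - (r - 1)) * (c - (time - (r - 1))) :=
        mul_nonneg (by omega) (by omega)
      nlinarith
  · intro ⟨h1, h2⟩
    have hprod : 0 ≤ (c - r) * ((time - r) - c) := mul_nonneg (by omega) (by omega)
    nlinarith

-- integer AM-GM: a Newton step from any x ≥ 1 stays at or above the integer square root
theorem pvAmGm (n x s : Int) (hx : 1 ≤ x) (hs : 0 ≤ s) (hsn : s * s ≤ n) :
    2 * s ≤ x + n / x := by
  have h1 : x * (n / x) + n % x = n := Int.ediv_add_emod n x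
  have h2 : 0 ≤ n % x := Int.emod_nonneg n (by omega)
  have h3 : n % x < x := Int.emod_lt_of_pos n (by omega)
  by_contra hc
  have hq : n / x + 1 ≤ 2 * s - x := by omega
  have h4 : (n / x + 1) * x ≤ (2 * s - x) * x :=
    mul_le_mul_of_nonneg_right hq (by omega)
  nlinarith [sq_nonneg (x - s)]

-- the Newton loop of Source B returns exactly the integer square root
theorem pvIsqrtGo_spec (n s : Int) (hs1 : 1 ≤ s) (hsn : s * s ≤ n) (hns : n < (s + 1) * (s + 1)) :
    ∀ (fuel : Nat) (x : Int), s ≤ x → (x - s).toNat < fuel →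
    pvIsqrtGo n fuel x (PySem.Int.floordiv (x + PySem.Int.floordiv n x) 2) = s := by
  intro fuel
  induction fuel with
  | zero => intro x _ hf; omega
  | succ fuel ih =>
    intro x hsx hf
    have hx1 : 1 ≤ x := by omega
    have hfd : PySem.Int.floordiv (x + PySem.Int.floordiv n x) 2 = (x + n / x) / 2 := by
      rw [PySem.Int.floordiv_eq_ediv_of_pos (show (0:Int) < x by omega),
          PySem.Int.floordiv_eq_ediv_of_pos (by norm_num : (0:Int) < 2)]
    have hy : s ≤ (x + n / x) / 2 := by
      rw [Int.le_ediv_iff_mul_le (by norm_num)]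
      have := pvAmGm n x s hx1 (by omega) hsn
      omega
    rw [hfd, pvIsqrtGo]
    by_cases hlt : (x + n / x) / 2 < x
    · rw [if_pos hlt]
      exact ih ((x + n / x) / 2) hy (by omega)
    · rw [if_neg hlt]
      have h2x : x * 2 ≤ x + n / x :=
        (Int.le_ediv_iff_mul_le (by norm_num)).mp (by omega)
      have hxq : x ≤ n / x := by omega
      have hdm : x * (n / x) + n % x = n := Int.ediv_add_emod n x
      have hm0 : 0 ≤ n % x := Int.emod_nonneg n (by omega)
      have hxx : x * x ≤ n := by nlinarith
      have : x < s + 1 := by nlinarith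
      omega

theorem pvIsqrt_spec (n s : Int) (hs1 : 1 ≤ s) (hsn : s * s ≤ n) (hns : n < (s + 1) * (s + 1)) :
    pvIsqrt n = s := by
  have hn1 : 1 ≤ n := by nlinarith
  have hnn : PySem.Int.floordiv n n = 1 := by
    rw [PySem.Int.floordiv_eq_ediv_of_pos (by omega)]
    exact Int.ediv_self (by omega)
  have h := pvIsqrtGo_spec n s hs1 hsn hns (n.toNat + 1) n (by nlinarith) (by omega)
  rw [hnn] at h
  exact h

-- four small square-comparison facts, stated standalone so nlinarith sees a tiny context
theorem pvSqLtDisc (t rec r : Int) (h : rec < (t - r) * (t - (t - r))) :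
    (t - 2 * r) * (t - 2 * r) < t * t - 4 * rec := by nlinarith

theorem pvDiscLeSq (t rec r : Int) (h : (t - r + 1) * (t - (t - r + 1)) ≤ rec) :
    t * t - 4 * rec ≤ (t - 2 * r + 2) * (t - 2 * r + 2) := by nlinarith

theorem pvLeOfSqLt (j s d : Int) (hj : 0 ≤ j) (hs : 0 ≤ s) (h1 : j * j < d) (h2 : d < (s + 1) * (s + 1)) :
    j ≤ s := by nlinarith

theorem pvLeOfSqLe (s k d : Int) (hs : 0 ≤ s) (hk : 0 < k) (h1 : s * s ≤ d) (h2 : d ≤ k * k) :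
    s ≤ k := by nlinarith

-- zeta-evaluation of B's let-chain, with hi0 abstracted
theorem pvAlt_eval (time rec hi0 : Int)
    (h : hi0 = PySem.Int.floordiv (time + pvIsqrt (time * time - 4 * rec)) 2) :
    ways_to_beat_record_binary_search_alt time rec =
      max (min (if hi0 * (time - hi0) ≤ rec then hi0 - 1 else hi0) time -
          max (time - (if hi0 * (time - hi0) ≤ rec then hi0 - 1 else hi0)) 0 + 1) 0 := by
  subst h; rfl

theorem ways_spec_core (time rec : Int) (htime : 0 ≤ time)
    (hpre : Pre_ways_to_beat_record_binary_search time rec) :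
    ways_to_beat_record_binary_search time rec = ways_to_beat_record_binary_search_alt time rec := by
  obtain ⟨hp1, hp2⟩ := hpre
  have hq := PySem.Int.floordiv_mul_add_mod time 2
  have hm0 := PySem.Int.mod_nonneg time (b := 2) (by norm_num)
  have hm2 := PySem.Int.mod_lt time (b := 2) (by norm_num)
  set q := PySem.Int.floordiv time 2 with hqdef
  have hrec : 0 < rec := by simpa using hp1
  -- q ≥ 1 (else its distance could not beat a positive record)
  have hq1 : 1 ≤ q := by
    by_contra hqle
    have hq0 : q = 0 := by omega
    rw [hq0] at hp2; simp at hp2; omega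
  have hloop := pvLoopA_spec time rec (q - 0).toNat 0 q (by omega) (by omega)
    (by simp [pvGetDistance]; omega) (by simpa [pvGetDistance] using hp2)
  set r := pvLoopA time rec 0 q with hrdef
  obtain ⟨hbr, hnbr, hr0, hrq⟩ := hloop
  have h2r : 2 * r ≤ time := by omega
  have hchar := pvBeats_iff time rec r h2r (by simpa [pvGetDistance] using hbr)
    (by simpa [pvGetDistance] using hnbr)
  -- the discriminant is positive inside Pre_ (record < q*(time-q) ≤ time²/4)
  set disc := time * time - 4 * rec with hdisc
  have hp2' : rec < q * (time - q) := by simpa [pvGetDistance] using hp2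
  have hdisc1 : 1 ≤ disc := by nlinarith [sq_nonneg (time - 2 * q)]
  -- s := the integer square root of disc
  set s : Int := ((disc.toNat).sqrt : Int) with hsdef
  have hdnn : ((disc.toNat : Int)) = disc := Int.toNat_of_nonneg (by omega)
  have hsn : s * s ≤ disc := by
    have h := Nat.sqrt_le' disc.toNat
    rw [pow_two] at h
    have h2 : ((disc.toNat.sqrt : Nat) : Int) * ((disc.toNat.sqrt : Nat) : Int) ≤ ((disc.toNat : Int)) := by
      exact_mod_cast h
    rw [hdnn] at h2
    exact h2
  have hns : disc < (s + 1) * (s + 1) := by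
    have h := Nat.lt_succ_sqrt' disc.toNat
    rw [Nat.succ_eq_add_one, pow_two] at h
    have h2 : ((disc.toNat : Int)) < (((disc.toNat.sqrt + 1 : Nat)) : Int) * (((disc.toNat.sqrt + 1 : Nat)) : Int) := by
      exact_mod_cast h
    rw [hdnn] at h2
    push_cast at h2
    exact h2
  have hs0 : 0 ≤ s := Int.natCast_nonneg _
  have hs1 : 1 ≤ s := by
    rcases (by omega : 1 ≤ s ∨ s = 0) with h | h
    · exact h
    · rw [h] at hns; norm_num at hns; omega
  -- the largest beating charge time is time - r
  have hH : rec < (time - r) * (time - (time - r)) :=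
    (hchar (time - r) (by omega) (by omega)).mpr ⟨by omega, by omega⟩
  have hH1 : (time - r + 1) * (time - (time - r + 1)) ≤ rec := by
    by_contra hb
    have hbb : rec < (time - r + 1) * (time - (time - r + 1)) := by omega
    have := (hchar (time - r + 1) (by omega) (by omega)).mp hbb
    omega
  -- B's hi0 = (time + s) // 2 lies in {time - r, time - r + 1}
  have hkl : time - r ≤ (time + s) / 2 := by
    have hj0 : 0 ≤ time - 2 * r := by omega
    have hj2 : (time - 2 * r) * (time - 2 * r) < disc := by
      rw [hdisc]; exact pvSqLtDisc time rec r hH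
    have hjs : time - 2 * r ≤ s := pvLeOfSqLt _ _ _ hj0 hs0 hj2 hns
    calc time - r = (2 * (time - r)) / 2 := by omega
      _ ≤ (time + s) / 2 := Int.ediv_le_ediv (by norm_num) (by omega)
  have hkr : (time + s) / 2 ≤ time - r + 1 := by
    have hk0 : 0 < time - 2 * r + 2 := by omega
    have hk2 : disc ≤ (time - 2 * r + 2) * (time - 2 * r + 2) := by
      rw [hdisc]; exact pvDiscLeSq time rec r hH1
    have hks : s ≤ time - 2 * r + 2 := pvLeOfSqLe _ _ _ hs0 hk0 hsn hk2
    calc (time + s) / 2 ≤ (2 * (time - r + 1)) / 2 := Int.ediv_le_ediv (by norm_num) (by omega)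
      _ = time - r + 1 := by omega
  -- evaluate B
  show pvGetWays time r = _
  rw [pvAlt_eval time rec ((time + s) / 2)
    (by rw [← hdisc, pvIsqrt_spec disc s hs1 hsn hns,
            PySem.Int.floordiv_eq_ediv_of_pos (by norm_num : (0:Int) < 2)])]
  rcases (by omega : (time + s) / 2 = time - r ∨ (time + s) / 2 = time - r + 1) with he | he
  · rw [he, if_neg (by omega)]
    unfold pvGetWays
    omega
  · rw [he, if_pos (by omega)]
    unfold pvGetWays
    omega

-- ===== VERDICT (by name: the statement is the Claim_ definition above) =====
theorem ways_to_beat_record_binary_search_spec : Claim_unchanged_ways_to_beat_record_binary_search := by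
  intro time rec _ hpre hnd
  exact ways_spec_core time rec (by unfold D_ways_to_beat_record_binary_search at hnd; omega) hpre

theorem ways_to_beat_record_binary_search_changed : Claim_changed_ways_to_beat_record_binary_search := by
  unfold Claim_changed_ways_to_beat_record_binary_search
  refine ⟨by decide, by decide, by decide, ?_, by decide, by decide⟩
  show pvGetWays (-5) (pvLoopA (-5) 5 0 (PySem.Int.floordiv (-5) 2)) = 2
  rw [show PySem.Int.floordiv (-5) 2 = -3 from by decide, pvLoopA, dif_neg (by decide)]
  decide

theorem ways_to_beat_record_binary_search_tight : Claim_exact_ways_to_beat_record_binary_search := by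
  unfold Claim_exact_ways_to_beat_record_binary_search
  intro time rec _ hpre hd
  unfold D_ways_to_beat_record_binary_search at hd
  have hq := PySem.Int.floordiv_mul_add_mod time 2
  have hm0 := PySem.Int.mod_nonneg time (b := 2) (by norm_num)
  have hm2 := PySem.Int.mod_lt time (b := 2) (by norm_num)
  set q := PySem.Int.floordiv time 2 with hqdef
  have hq0 : q < 0 := by omega
  have hA : ways_to_beat_record_binary_search time rec = time - 2 * q + 1 := by
    show pvGetWays time (pvLoopA time rec 0 q) = _
    rw [pvLoopA, dif_neg (by omega)]
    unfold pvGetWays; ring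
  have hB : ways_to_beat_record_binary_search_alt time rec = 0 := by
    rw [pvAlt_eval time rec _ rfl]
    split_ifs <;> omega
  rw [hA, hB]
  omega
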